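-- pv_equiv track=rewrite | github.com/linneawalsh/autograder-CNF | CNF.py | buildAnd
-- ===== SOURCE A (Python) =====
-- def permuteTerms(clauses, count, vars):
--     curr = clauses[count]
--     continuedVars = []
--     for variation in curr:
--         newList = vars.copy()
--         newList.append(variation)
--         if count is len(clauses) - 1:
--             continuedVars.append(newList)
--         else:
--             permutes = permuteTerms(clauses, count+1, newList)
--             for thing in permutes:
--                 continuedVars.append(thing)
--     return continuedVars
--
-- def buildAnd(clauses):
--     orStatements = permuteTerms(clauses, 0, [])
--     output = "(and"
--     for statement in orStatements:
--         orOutput = " (or"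
--         for term in statement:
--             orOutput += " " + term
--         orOutput += ")"
--         output += orOutput
--     output += ")"
--     return output
-- ===== SOURCE B (Python) =====
-- def buildAnd(clauses):
--     combos = [[]]
--     for clause in clauses:
--         combos = [c + [v] for c in combos for v in clause]
--     return "(and" + "".join(" (or " + " ".join(c) + ")" for c in combos) + ")"
-- ===== Notes on version B (the rewrite author's own statement) =====
-- stated objective: idiomatic
-- what changed: The mutually recursive permuteTerms accumulator is replaced by an iterative Cartesian-product fold over the clauses, and the output string is assembled by joins over the resulting combos instead of nested string-accumulating loops.
-- crash fix: A raises IndexError on empty clauses (clauses[0]) and whenever len(clauses) >= 258 (the 'count is len(clauses)-1' identity test fails beyond CPython's small-int cache, so the recursion runs off the list); B returns the natural product string there, e.g. "(and (or ))" for []. — e.g. on buildAnd([]): A raises IndexError, B returns "(and (or ))"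
import Mathlib
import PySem

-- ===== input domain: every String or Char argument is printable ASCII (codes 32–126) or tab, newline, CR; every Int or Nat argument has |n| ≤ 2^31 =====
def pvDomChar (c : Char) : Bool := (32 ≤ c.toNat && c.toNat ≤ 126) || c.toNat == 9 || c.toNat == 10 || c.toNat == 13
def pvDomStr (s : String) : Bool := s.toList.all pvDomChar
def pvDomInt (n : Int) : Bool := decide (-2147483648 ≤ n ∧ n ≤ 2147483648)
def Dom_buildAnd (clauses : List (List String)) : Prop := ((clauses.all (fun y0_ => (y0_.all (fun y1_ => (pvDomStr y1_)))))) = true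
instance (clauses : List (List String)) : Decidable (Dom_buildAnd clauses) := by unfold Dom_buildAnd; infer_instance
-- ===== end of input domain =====

-- B replaces the recursion permuteTerms by an iterative product fold and builds the
-- string with a join over combos (idiomatic; same asymptotic cost).


-- ===== PORT A =====
-- permuteTerms, transliterated.  Python's `count is len(clauses) - 1` is ported as
-- equality, which is what CPython computes for lengths ≤ 257 (small-int cache); Pre_
-- restricts to that range.  The `count < clauses.length` guard only makes the indexing
-- clauses[count] total: Python raises IndexError there (excluded by Pre_).
mutual
def permuteTerms (clauses : List (List String)) (count : Nat) (vars : List String) : List (List String) :=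
  if h : count < clauses.length then
    permuteLoop clauses count h vars clauses[count] []
  else []
termination_by (clauses.length - count, 1, 0)
def permuteLoop (clauses : List (List String)) (count : Nat) (h : count < clauses.length)
    (vars : List String) (curr : List String) (continuedVars : List (List String)) : List (List String) :=
  match curr with
  | [] => continuedVars
  | variation :: rest =>
    let newList := vars ++ [variation]
    if count = clauses.length - 1 then
      permuteLoop clauses count h vars rest (continuedVars ++ [newList])
    else
      permuteLoop clauses count h vars rest (continuedVars ++ permuteTerms clauses (count + 1) newList)
termination_by (clauses.length - count, 0, curr.length)
decreasing_by
  · exact Prod.Lex.right _ (Prod.Lex.right _ (by simp only [List.length_cons]; omega))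
  · exact Prod.Lex.left _ _ (by omega)
  · exact Prod.Lex.right _ (Prod.Lex.right _ (by simp only [List.length_cons]; omega))
end

def buildAnd (clauses : List (List String)) : String :=
  let orStatements := permuteTerms clauses 0 []
  let output :=
    orStatements.foldl (fun output statement =>
      output ++ (statement.foldl (fun orOutput term => orOutput ++ " " ++ term) " (or") ++ ")") "(and"
  output ++ ")"

-- ===== PORT B =====
def buildAnd_alt (clauses : List (List String)) : String :=
  let combos :=
    clauses.foldl (fun combos clause => combos.flatMap (fun c => clause.map (fun v => c ++ [v]))) [[]]
  "(and" ++ PySem.Str.join "" (combos.map (fun c => " (or " ++ PySem.Str.join " " c ++ ")")) ++ ")"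

-- ===== PRECONDITION & SPEC =====
-- A raises IndexError on [] (clauses[0]), and also whenever len(clauses) ≥ 258: the test
-- `count is len(clauses) - 1` compares int identity, which fails beyond CPython's
-- small-int cache (ints > 256), so the recursion overruns the list.  Pre_ excludes
-- exactly those crashing inputs.
def Pre_buildAnd (clauses : List (List String)) : Prop :=
  1 ≤ clauses.length ∧ clauses.length ≤ 257
instance (clauses : List (List String)) : Decidable (Pre_buildAnd clauses) := by
  unfold Pre_buildAnd; infer_instance
def pvWitness_buildAnd : List (List String) := [["a", "b"], ["c"]]

-- A raises IndexError on empty `clauses` and on 258 or more clauses (int-identity `is`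
-- test); B returns the natural product string there ("(and (or ))" for the empty input).
def Raises_buildAnd (clauses : List (List String)) : Prop :=
  clauses = [] ∨ 258 ≤ clauses.length
instance (clauses : List (List String)) : Decidable (Raises_buildAnd clauses) := by
  unfold Raises_buildAnd; infer_instance
def pvRaiseWitness_buildAnd : List (List String) := []
def pvRaiseWitnessOut_buildAnd : String := "(and (or ))"

def Spec_buildAnd (clauses : List (List String)) (out : String) : Prop := out = buildAnd_alt clauses
instance (clauses : List (List String)) (out : String) : Decidable (Spec_buildAnd clauses out) := by unfold Spec_buildAnd; infer_instance

-- ===== CLAIM (what is proved, stated in full; the proofs are below) =====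
def Claim_equal_buildAnd : Prop := ∀ (clauses : List (List String)), Dom_buildAnd clauses → Pre_buildAnd clauses → Spec_buildAnd clauses (buildAnd clauses)
def Claim_raises_buildAnd : Prop :=
  (∀ (clauses : List (List String)), Dom_buildAnd clauses → Raises_buildAnd clauses → ¬ Pre_buildAnd clauses) ∧
  (Dom_buildAnd (pvRaiseWitness_buildAnd) ∧ Raises_buildAnd (pvRaiseWitness_buildAnd) ∧
    buildAnd_alt (pvRaiseWitness_buildAnd) = pvRaiseWitnessOut_buildAnd)

-- ===== LEMMAS AND PROOFS =====

-- the common combinatorial core: ordered tuples picking one element per clause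
def pvTuples : List (List String) → List (List String)
  | [] => [[]]
  | c :: rest => c.flatMap (fun v => (pvTuples rest).map (fun t => v :: t))

theorem pvLoop_eq (clauses : List (List String)) (count : Nat) (h : count < clauses.length)
    (vars : List String) (curr : List String) (acc : List (List String)) :
    permuteLoop clauses count h vars curr acc =
      acc ++ curr.flatMap (fun v =>
        if count = clauses.length - 1 then [vars ++ [v]]
        else permuteTerms clauses (count + 1) (vars ++ [v])) := by
  induction curr generalizing acc with
  | nil => rw [permuteLoop]; simp
  | cons v rest ih =>
    rw [permuteLoop]
    by_cases hc : count = clauses.length - 1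
    · rw [if_pos hc, ih]
      simp [hc]
    · rw [if_neg hc, ih]
      simp [hc]

theorem pvPermute_eq (clauses : List (List String)) (count : Nat) (hlt : count < clauses.length)
    (vars : List String) :
    permuteTerms clauses count vars =
      (pvTuples (clauses.drop count)).map (fun t => vars ++ t) := by
  induction hn : clauses.length - count generalizing count vars with
  | zero => omega
  | succ n ih =>
    rw [permuteTerms]
    simp only [hlt, dif_pos]
    rw [pvLoop_eq]
    have hdrop : clauses.drop count = clauses[count] :: clauses.drop (count + 1) :=
      List.drop_eq_getElem_cons hlt
    rw [hdrop]
    by_cases hc : count = clauses.length - 1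
    · have hnil : clauses.drop (count + 1) = [] := List.drop_eq_nil_of_le (by omega)
      rw [hc] at hnil
      simp [pvTuples, hc, hnil, List.flatMap_def, List.map_map]
      apply congrArg List.flatten
      apply List.map_congr_left
      intro v _
      simp
    · have hlt' : count + 1 < clauses.length := by omega
      simp only [hc, if_false, pvTuples, List.flatMap_def, List.nil_append]
      rw [List.map_flatten, List.map_map]
      apply congrArg List.flatten
      apply List.map_congr_left
      intro v _
      rw [ih (count + 1) hlt' (vars ++ [v]) (by omega)]
      simp [List.map_map, Function.comp, List.append_assoc]

-- B's fold builds the same tuples (appending on the right)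
theorem pvFold_eq (l : List (List String)) (acc : List (List String)) :
    l.foldl (fun combos clause => combos.flatMap (fun c => clause.map (fun v => c ++ [v]))) acc =
      acc.flatMap (fun c => (pvTuples l).map (fun t => c ++ t)) := by
  induction l generalizing acc with
  | nil => simp [pvTuples]
  | cons clause rest ih =>
    simp only [List.foldl_cons, ih, pvTuples]
    simp [List.flatMap_assoc, List.map_flatMap, List.flatMap_map, List.map_map,
      List.append_assoc]
    rfl

-- every tuple from a nonempty clause list is nonempty
theorem pvTuples_ne_nil (c : List String) (rest : List (List String)) :
    ∀ t ∈ pvTuples (c :: rest), t ≠ [] := by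
  intro t ht
  simp [pvTuples, List.mem_flatMap] at ht
  obtain ⟨v, _, t', _, rfl⟩ := ht
  simp

-- join facts used by the string lemmas below
theorem pvJoin_single (sep a : String) : PySem.Str.join sep [a] = a := by
  apply String.ext
  simp [PySem.Str.join, PySem.Chars.join_singleton]

theorem pvJoin_space_cons (a b : String) (rs : List String) :
    PySem.Str.join " " (a :: b :: rs) = a ++ " " ++ PySem.Str.join " " (b :: rs) := by
  apply String.ext
  simp [PySem.Str.join, PySem.Chars.join_cons_cons, String.toList_append]

theorem pvJoin_empty_cons (s : String) (rest : List String) :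
    PySem.Str.join "" (s :: rest) = s ++ PySem.Str.join "" rest := by
  apply String.ext
  cases rest <;>
    simp [PySem.Str.join, PySem.Chars.join_cons_cons, PySem.Chars.join_nil,
      PySem.Chars.join_singleton, String.toList_append]

-- the inner string loop equals " (or " ++ " ".join, for nonempty statements
theorem pvInner_fold (rest : List String) : ∀ (p a : String),
    ((a :: rest).foldl (fun orOutput term => orOutput ++ " " ++ term) p) =
      p ++ " " ++ PySem.Str.join " " (a :: rest) := by
  induction rest with
  | nil => intro p a; simp [pvJoin_single]
  | cons b rs ih =>
    intro p a
    simp only [List.foldl_cons] at *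
    rw [ih, pvJoin_space_cons]
    simp [String.append_assoc]

theorem pvInner_eq (s : List String) (hs : s ≠ []) :
    (s.foldl (fun orOutput term => orOutput ++ " " ++ term) " (or") ++ ")" =
      " (or " ++ PySem.Str.join " " s ++ ")" := by
  obtain ⟨a, rest, rfl⟩ := List.exists_cons_of_ne_nil hs
  rw [pvInner_fold]
  rfl

-- the outer string loop equals "".join of the per-statement strings
theorem pvOuter_eq (f : List String → String) (l : List (List String)) (p : String) :
    l.foldl (fun out s => out ++ f s) p = p ++ PySem.Str.join "" (l.map f) := by
  induction l generalizing p with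
  | nil =>
    have : PySem.Str.join "" ([] : List String) = "" := by
      apply String.ext; simp [PySem.Str.join, PySem.Chars.join_nil]
    simp [this]
  | cons s rest ih =>
    simp only [List.foldl_cons, List.map_cons, ih]
    rw [pvJoin_empty_cons, String.append_assoc]

-- ===== VERDICT (by name: the statement is the Claim_ definition above) =====
theorem buildAnd_spec : Claim_equal_buildAnd := by
  intro clauses _ hpre
  unfold Spec_buildAnd buildAnd buildAnd_alt
  dsimp only
  obtain ⟨h1, _⟩ := hpre
  have hne : clauses ≠ [] := by cases clauses <;> simp_all
  obtain ⟨c0, rest, rfl⟩ := List.exists_cons_of_ne_nil hne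
  have hp := pvPermute_eq (c0 :: rest) 0 (by simp) []
  simp only [List.drop_zero, List.nil_append, List.map_id_fun'] at hp
  have hf := pvFold_eq (c0 :: rest) [[]]
  simp only [List.flatMap_cons, List.flatMap_nil, List.append_nil, List.nil_append,
    List.map_id_fun'] at hf
  rw [hp, hf]
  simp only [id]
  have hfun : (fun (output : String) (statement : List String) =>
        output ++ (statement.foldl (fun orOutput term => orOutput ++ " " ++ term) " (or") ++ ")") =
      (fun (output : String) (statement : List String) =>
        output ++ ((statement.foldl (fun orOutput term => orOutput ++ " " ++ term) " (or") ++ ")")) := by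
    funext o st
    rw [String.append_assoc]
  rw [hfun]
  rw [pvOuter_eq (fun st => (st.foldl (fun orOutput term => orOutput ++ " " ++ term) " (or") ++ ")")]
  have hmaps : (pvTuples (c0 :: rest)).map
        (fun st => (st.foldl (fun orOutput term => orOutput ++ " " ++ term) " (or") ++ ")") =
      (pvTuples (c0 :: rest)).map (fun c => " (or " ++ PySem.Str.join " " c ++ ")") := by
    apply List.map_congr_left
    intro t ht
    exact pvInner_eq t (pvTuples_ne_nil c0 rest t ht)
  rw [hmaps]

theorem buildAnd_raises : Claim_raises_buildAnd := by
  unfold Claim_raises_buildAnd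
  constructor
  · intro clauses _ hr hpre
    unfold Pre_buildAnd at hpre
    rcases hr with h | h
    · subst h; simp at hpre
    · omega
  · refine ⟨by decide, Or.inl rfl, by decide⟩

-- self-check: the witness component of buildAnd_raises, re-stated on its own
theorem pvRaiseWitness_ok : buildAnd_alt pvRaiseWitness_buildAnd = pvRaiseWitnessOut_buildAnd :=
  buildAnd_raises.2.2.2
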